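-- pv_equiv track=rewrite | github.com/mk12002/email_security | scripts/populate_behavior_graph.py | _infer_department
-- ===== SOURCE A (Python) =====
-- def _infer_department(recipient_email: str) -> str:
--     local = recipient_email.split("@", 1)[0].lower()
--     if any(k in local for k in ("finance", "account", "payroll", "invoice")):
--         return "finance"
--     if any(k in local for k in ("hr", "recruit", "talent")):
--         return "hr"
--     if any(k in local for k in ("ceo", "cfo", "coo", "cto", "exec", "director")):
--         return "executive"
--     if any(k in local for k in ("sales", "bizdev")):
--         return "sales"
--     if any(k in local for k in ("marketing", "brand", "campaign")):
--         return "marketing"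
--     if any(k in local for k in ("eng", "dev", "sre", "qa", "tech")):
--         return "engineering"
--     if any(k in local for k in ("it", "helpdesk", "support", "ops")):
--         return "it"
--     return "operations"
-- ===== SOURCE B (Python) =====
-- _DEPTS = ("finance", "hr", "executive", "sales", "marketing",
--           "engineering", "it", "operations")
--
-- _PRIORITY = {
--     kw: idx
--     for idx, kws in enumerate((
--         ("finance", "account", "payroll", "invoice"),
--         ("hr", "recruit", "talent"),
--         ("ceo", "cfo", "coo", "cto", "exec", "director"),
--         ("sales", "bizdev"),
--         ("marketing", "brand", "campaign"),
--         ("eng", "dev", "sre", "qa", "tech"),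
--         ("it", "helpdesk", "support", "ops"),
--     ))
--     for kw in kws
-- }
--
-- _MAXLEN = max(map(len, _PRIORITY))
--
--
-- def _infer_department(recipient_email: str) -> str:
--     # Text-driven scan: walk the local part once, look every bounded-length
--     # substring up in a keyword->priority hash, and keep the smallest priority.
--     local = recipient_email.split("@", 1)[0].lower()
--     n = len(local)
--     best = len(_DEPTS) - 1  # default: operations
--     for i in range(n):
--         for j in range(i + 1, min(i + _MAXLEN, n) + 1):
--             p = _PRIORITY.get(local[i:j])
--             if p is not None and p < best:
--                 best = p
--     return _DEPTS[best]
-- ===== Notes on version B (the rewrite author's own statement) =====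
-- stated objective: alternative
-- what changed: Instead of scanning the local part once per keyword through an if-chain, B walks the local part once and looks every bounded-length substring up in a precomputed keyword-to-priority hash, keeping the smallest priority seen; the department list is indexed by that priority.
import Mathlib
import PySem

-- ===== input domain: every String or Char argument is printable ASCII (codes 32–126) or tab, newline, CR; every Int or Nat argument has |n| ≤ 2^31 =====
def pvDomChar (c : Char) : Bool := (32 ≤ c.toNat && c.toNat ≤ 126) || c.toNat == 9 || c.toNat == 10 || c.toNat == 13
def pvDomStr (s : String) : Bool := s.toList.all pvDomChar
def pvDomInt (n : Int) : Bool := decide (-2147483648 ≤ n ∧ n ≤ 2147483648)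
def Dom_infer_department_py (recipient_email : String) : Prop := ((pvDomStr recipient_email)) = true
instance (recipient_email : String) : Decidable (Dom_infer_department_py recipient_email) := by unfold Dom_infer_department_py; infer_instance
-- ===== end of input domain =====

-- B replaces A's per-keyword membership scans with a text-driven scan: every bounded-length
-- substring of the local part is looked up in a keyword->priority hash and the smallest
-- priority wins (objective: alternative).

-- ===== PORT A =====
def infer_department_py (recipient_email : String) : String :=
  let loc := PySem.Str.lower (((PySem.Str.splitMax? recipient_email "@" 1).getD []).headD "")
  if PySem.Str.isIn "finance" loc || (PySem.Str.isIn "account" loc || (PySem.Str.isIn "payroll" loc || (PySem.Str.isIn "invoice" loc))) then "finance"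
  else if PySem.Str.isIn "hr" loc || (PySem.Str.isIn "recruit" loc || (PySem.Str.isIn "talent" loc)) then "hr"
  else if PySem.Str.isIn "ceo" loc || (PySem.Str.isIn "cfo" loc || (PySem.Str.isIn "coo" loc || (PySem.Str.isIn "cto" loc || (PySem.Str.isIn "exec" loc || (PySem.Str.isIn "director" loc))))) then "executive"
  else if PySem.Str.isIn "sales" loc || (PySem.Str.isIn "bizdev" loc) then "sales"
  else if PySem.Str.isIn "marketing" loc || (PySem.Str.isIn "brand" loc || (PySem.Str.isIn "campaign" loc)) then "marketing"
  else if PySem.Str.isIn "eng" loc || (PySem.Str.isIn "dev" loc || (PySem.Str.isIn "sre" loc || (PySem.Str.isIn "qa" loc || (PySem.Str.isIn "tech" loc)))) then "engineering"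
  else if PySem.Str.isIn "it" loc || (PySem.Str.isIn "helpdesk" loc || (PySem.Str.isIn "support" loc || (PySem.Str.isIn "ops" loc))) then "it"
  else "operations"

-- ===== PORT B =====
def pvDepts : List String :=
  ["finance", "hr", "executive", "sales", "marketing", "engineering", "it", "operations"]

def pvGroups : List (List String) :=
  [["finance", "account", "payroll", "invoice"],
   ["hr", "recruit", "talent"],
   ["ceo", "cfo", "coo", "cto", "exec", "director"],
   ["sales", "bizdev"],
   ["marketing", "brand", "campaign"],
   ["eng", "dev", "sre", "qa", "tech"],
   ["it", "helpdesk", "support", "ops"]]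

-- _PRIORITY = {kw: idx for idx, kws in enumerate(...) for kw in kws}
def pvPriority : PySem.Dict String Int :=
  (PySem.List.enumerate pvGroups).foldl
    (fun d p => p.2.foldl (fun d kw => PySem.Dict.insert d kw p.1) d)
    PySem.Dict.empty

-- _MAXLEN = max(map(len, _PRIORITY)); the dict is a nonempty constant, so the
-- `.getD 0` default of the total form is never reached.
def pvMaxLen : Int := (((PySem.Dict.keys pvPriority).map PySem.Str.len).max?).getD 0

def infer_department_py_alt (recipient_email : String) : String :=
  let loc := PySem.Str.lower (((PySem.Str.splitMax? recipient_email "@" 1).getD []).headD "")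
  let n := PySem.Str.len loc
  let best := (PySem.List.pyRange 0 n 1).foldl (fun best i =>
      (PySem.List.pyRange (i+1) (min (i + pvMaxLen) n + 1) 1).foldl (fun best j =>
        match PySem.Dict.get? pvPriority (PySem.Str.slice loc (some i) (some j)) with
        | some p => if p < best then p else best
        | none => best) best)
    ((pvDepts.length : Int) - 1)
  -- _DEPTS[best]: best is provably in [0, 7], so the total indexing form is exact
  PySem.List.pyGetD pvDepts best ""

-- ===== PRECONDITION & SPEC =====
def Spec_infer_department_py (recipient_email : String) (out : String) : Prop := out = infer_department_py_alt recipient_email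
instance (recipient_email : String) (out : String) : Decidable (Spec_infer_department_py recipient_email out) := by unfold Spec_infer_department_py; infer_instance

-- ===== CLAIM (what is proved, stated in full; the proofs are below) =====
def Claim_equal_infer_department_py : Prop := ∀ (recipient_email : String), Dom_infer_department_py recipient_email → Spec_infer_department_py recipient_email (infer_department_py recipient_email)

-- ===== LEMMAS AND PROOFS =====

set_option maxRecDepth 10000

-- the body of B's inner loop, as a function of the looked-up substring
def pvStep (best : Int) (sub : String) : Int :=
  match PySem.Dict.get? pvPriority sub with
  | some p => if p < best then p else best
  | none => best

-- the list of all substrings B's nested loops look up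
def pvSubs (loc : String) : List String :=
  (PySem.List.pyRange 0 (PySem.Str.len loc) 1).flatMap (fun i =>
    (PySem.List.pyRange (i+1) (min (i + 9) (PySem.Str.len loc) + 1) 1).map
      (fun j => PySem.Str.slice loc (some i) (some j)))

-- group q of A's chain has a matching keyword
def pvCond (loc : String) (q : Int) : Bool :=
  (pvGroups.getD q.toNat []).any (fun kw => PySem.Str.isIn kw loc)

-- the index of the first group A's chain accepts (7 = default)
def pvFirst (loc : String) : Int :=
  if pvCond loc 0 then 0 else if pvCond loc 1 then 1 else if pvCond loc 2 then 2
  else if pvCond loc 3 then 3 else if pvCond loc 4 then 4 else if pvCond loc 5 then 5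
  else if pvCond loc 6 then 6 else 7

lemma pvMaxLen_eq : pvMaxLen = 9 := by decide

lemma pvStep_eq_some (b : Int) (sub : String) (p : Int)
    (hp : PySem.Dict.get? pvPriority sub = some p) :
    pvStep b sub = if p < b then p else b := by
  unfold pvStep; rw [hp]

lemma pvStep_eq_none (b : Int) (sub : String)
    (hp : PySem.Dict.get? pvPriority sub = none) : pvStep b sub = b := by
  unfold pvStep; rw [hp]

lemma pvStep_le (b : Int) (sub : String) : pvStep b sub ≤ b := by
  rcases h : PySem.Dict.get? pvPriority sub with _ | p
  · rw [pvStep_eq_none b sub h]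
  · rw [pvStep_eq_some b sub p h]; split_ifs <;> omega

lemma pvStep_le_hit (b : Int) (sub : String) (p : Int)
    (hp : PySem.Dict.get? pvPriority sub = some p) : pvStep b sub ≤ p := by
  rw [pvStep_eq_some b sub p hp]; split_ifs <;> omega

lemma foldl_pvStep_le (S : List String) (b : Int) : S.foldl pvStep b ≤ b := by
  induction S generalizing b with
  | nil => simp
  | cons x xs ih => exact le_trans (ih (pvStep b x)) (pvStep_le b x)

lemma foldl_pvStep_le_hit (S : List String) (sub : String) (p : Int)
    (hp : PySem.Dict.get? pvPriority sub = some p) :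
    ∀ b : Int, sub ∈ S → S.foldl pvStep b ≤ p := by
  induction S with
  | nil => intro b hmem; cases hmem
  | cons x xs ih =>
    intro b hmem
    rcases List.mem_cons.mp hmem with hx | hx
    · subst hx
      exact le_trans (foldl_pvStep_le xs (pvStep b sub)) (pvStep_le_hit b sub p hp)
    · exact ih (pvStep b x) hx

lemma foldl_pvStep_reach (S : List String) (b : Int) :
    S.foldl pvStep b = b ∨ ∃ sub ∈ S, PySem.Dict.get? pvPriority sub = some (S.foldl pvStep b) := by
  induction S generalizing b with
  | nil => exact Or.inl rfl
  | cons x xs ih =>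
    simp only [List.foldl_cons]
    rcases ih (pvStep b x) with h | ⟨sub, hmem, hp⟩
    · rw [h]
      rcases hx : PySem.Dict.get? pvPriority x with _ | p
      · rw [pvStep_eq_none b x hx]
        exact Or.inl rfl
      · rw [pvStep_eq_some b x p hx]
        split_ifs with hlt
        · exact Or.inr ⟨x, by simp, hx⟩
        · exact Or.inl rfl
    · exact Or.inr ⟨sub, by simp [hmem], hp⟩

-- B's nested fold is the fold of pvStep over all looked-up substrings
lemma alt_fold_eq (loc : String) :
    (PySem.List.pyRange 0 (PySem.Str.len loc) 1).foldl (fun best i =>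
      (PySem.List.pyRange (i+1) (min (i + pvMaxLen) (PySem.Str.len loc) + 1) 1).foldl (fun best j =>
        match PySem.Dict.get? pvPriority (PySem.Str.slice loc (some i) (some j)) with
        | some p => if p < best then p else best
        | none => best) best)
      ((pvDepts.length : Int) - 1)
    = (pvSubs loc).foldl pvStep 7 := by
  rw [pvMaxLen_eq]
  unfold pvSubs
  rw [List.foldl_flatMap]
  simp only [List.foldl_map]
  rfl

lemma get?_sound (sub : String) (p : Int)
    (h : PySem.Dict.get? pvPriority sub = some p) :
    0 ≤ p ∧ p ≤ 6 ∧ sub ∈ pvGroups.getD p.toNat [] := by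
  by_cases h1 : sub = "finance"
  · subst h1
    rw [show PySem.Dict.get? pvPriority "finance" = some 0 from by decide] at h
    injection h with h'
    subst h'
    exact ⟨by norm_num, by norm_num, by decide⟩
  by_cases h2 : sub = "account"
  · subst h2
    rw [show PySem.Dict.get? pvPriority "account" = some 0 from by decide] at h
    injection h with h'
    subst h'
    exact ⟨by norm_num, by norm_num, by decide⟩
  by_cases h3 : sub = "payroll"
  · subst h3
    rw [show PySem.Dict.get? pvPriority "payroll" = some 0 from by decide] at h
    injection h with h'
    subst h'
    exact ⟨by norm_num, by norm_num, by decide⟩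
  by_cases h4 : sub = "invoice"
  · subst h4
    rw [show PySem.Dict.get? pvPriority "invoice" = some 0 from by decide] at h
    injection h with h'
    subst h'
    exact ⟨by norm_num, by norm_num, by decide⟩
  by_cases h5 : sub = "hr"
  · subst h5
    rw [show PySem.Dict.get? pvPriority "hr" = some 1 from by decide] at h
    injection h with h'
    subst h'
    exact ⟨by norm_num, by norm_num, by decide⟩
  by_cases h6 : sub = "recruit"
  · subst h6
    rw [show PySem.Dict.get? pvPriority "recruit" = some 1 from by decide] at h
    injection h with h'
    subst h'
    exact ⟨by norm_num, by norm_num, by decide⟩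
  by_cases h7 : sub = "talent"
  · subst h7
    rw [show PySem.Dict.get? pvPriority "talent" = some 1 from by decide] at h
    injection h with h'
    subst h'
    exact ⟨by norm_num, by norm_num, by decide⟩
  by_cases h8 : sub = "ceo"
  · subst h8
    rw [show PySem.Dict.get? pvPriority "ceo" = some 2 from by decide] at h
    injection h with h'
    subst h'
    exact ⟨by norm_num, by norm_num, by decide⟩
  by_cases h9 : sub = "cfo"
  · subst h9
    rw [show PySem.Dict.get? pvPriority "cfo" = some 2 from by decide] at h
    injection h with h'
    subst h'
    exact ⟨by norm_num, by norm_num, by decide⟩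
  by_cases h10 : sub = "coo"
  · subst h10
    rw [show PySem.Dict.get? pvPriority "coo" = some 2 from by decide] at h
    injection h with h'
    subst h'
    exact ⟨by norm_num, by norm_num, by decide⟩
  by_cases h11 : sub = "cto"
  · subst h11
    rw [show PySem.Dict.get? pvPriority "cto" = some 2 from by decide] at h
    injection h with h'
    subst h'
    exact ⟨by norm_num, by norm_num, by decide⟩
  by_cases h12 : sub = "exec"
  · subst h12
    rw [show PySem.Dict.get? pvPriority "exec" = some 2 from by decide] at h
    injection h with h'
    subst h'
    exact ⟨by norm_num, by norm_num, by decide⟩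
  by_cases h13 : sub = "director"
  · subst h13
    rw [show PySem.Dict.get? pvPriority "director" = some 2 from by decide] at h
    injection h with h'
    subst h'
    exact ⟨by norm_num, by norm_num, by decide⟩
  by_cases h14 : sub = "sales"
  · subst h14
    rw [show PySem.Dict.get? pvPriority "sales" = some 3 from by decide] at h
    injection h with h'
    subst h'
    exact ⟨by norm_num, by norm_num, by decide⟩
  by_cases h15 : sub = "bizdev"
  · subst h15
    rw [show PySem.Dict.get? pvPriority "bizdev" = some 3 from by decide] at h
    injection h with h'
    subst h'
    exact ⟨by norm_num, by norm_num, by decide⟩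
  by_cases h16 : sub = "marketing"
  · subst h16
    rw [show PySem.Dict.get? pvPriority "marketing" = some 4 from by decide] at h
    injection h with h'
    subst h'
    exact ⟨by norm_num, by norm_num, by decide⟩
  by_cases h17 : sub = "brand"
  · subst h17
    rw [show PySem.Dict.get? pvPriority "brand" = some 4 from by decide] at h
    injection h with h'
    subst h'
    exact ⟨by norm_num, by norm_num, by decide⟩
  by_cases h18 : sub = "campaign"
  · subst h18
    rw [show PySem.Dict.get? pvPriority "campaign" = some 4 from by decide] at h
    injection h with h'
    subst h'
    exact ⟨by norm_num, by norm_num, by decide⟩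
  by_cases h19 : sub = "eng"
  · subst h19
    rw [show PySem.Dict.get? pvPriority "eng" = some 5 from by decide] at h
    injection h with h'
    subst h'
    exact ⟨by norm_num, by norm_num, by decide⟩
  by_cases h20 : sub = "dev"
  · subst h20
    rw [show PySem.Dict.get? pvPriority "dev" = some 5 from by decide] at h
    injection h with h'
    subst h'
    exact ⟨by norm_num, by norm_num, by decide⟩
  by_cases h21 : sub = "sre"
  · subst h21
    rw [show PySem.Dict.get? pvPriority "sre" = some 5 from by decide] at h
    injection h with h'
    subst h'
    exact ⟨by norm_num, by norm_num, by decide⟩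
  by_cases h22 : sub = "qa"
  · subst h22
    rw [show PySem.Dict.get? pvPriority "qa" = some 5 from by decide] at h
    injection h with h'
    subst h'
    exact ⟨by norm_num, by norm_num, by decide⟩
  by_cases h23 : sub = "tech"
  · subst h23
    rw [show PySem.Dict.get? pvPriority "tech" = some 5 from by decide] at h
    injection h with h'
    subst h'
    exact ⟨by norm_num, by norm_num, by decide⟩
  by_cases h24 : sub = "it"
  · subst h24
    rw [show PySem.Dict.get? pvPriority "it" = some 6 from by decide] at h
    injection h with h'
    subst h'
    exact ⟨by norm_num, by norm_num, by decide⟩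
  by_cases h25 : sub = "helpdesk"
  · subst h25
    rw [show PySem.Dict.get? pvPriority "helpdesk" = some 6 from by decide] at h
    injection h with h'
    subst h'
    exact ⟨by norm_num, by norm_num, by decide⟩
  by_cases h26 : sub = "support"
  · subst h26
    rw [show PySem.Dict.get? pvPriority "support" = some 6 from by decide] at h
    injection h with h'
    subst h'
    exact ⟨by norm_num, by norm_num, by decide⟩
  by_cases h27 : sub = "ops"
  · subst h27
    rw [show PySem.Dict.get? pvPriority "ops" = some 6 from by decide] at h
    injection h with h'
    subst h'
    exact ⟨by norm_num, by norm_num, by decide⟩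
  -- sub is none of the 27 keys: the lookup misses
  have hnone : PySem.Dict.get? pvPriority sub = none := by
    have hitems : pvPriority.items = [("finance", (0:Int)), ("account", (0:Int)), ("payroll", (0:Int)), ("invoice", (0:Int)), ("hr", (1:Int)), ("recruit", (1:Int)), ("talent", (1:Int)), ("ceo", (2:Int)), ("cfo", (2:Int)), ("coo", (2:Int)), ("cto", (2:Int)), ("exec", (2:Int)), ("director", (2:Int)), ("sales", (3:Int)), ("bizdev", (3:Int)), ("marketing", (4:Int)), ("brand", (4:Int)), ("campaign", (4:Int)), ("eng", (5:Int)), ("dev", (5:Int)), ("sre", (5:Int)), ("qa", (5:Int)), ("tech", (5:Int)), ("it", (6:Int)), ("helpdesk", (6:Int)), ("support", (6:Int)), ("ops", (6:Int))] := by decide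
    simp [PySem.Dict.get?, hitems, Ne.symm h1, Ne.symm h2, Ne.symm h3, Ne.symm h4, Ne.symm h5, Ne.symm h6, Ne.symm h7, Ne.symm h8, Ne.symm h9, Ne.symm h10, Ne.symm h11, Ne.symm h12, Ne.symm h13, Ne.symm h14, Ne.symm h15, Ne.symm h16, Ne.symm h17, Ne.symm h18, Ne.symm h19, Ne.symm h20, Ne.symm h21, Ne.symm h22, Ne.symm h23, Ne.symm h24, Ne.symm h25, Ne.symm h26, Ne.symm h27]
  rw [hnone] at h
  simp at h

-- every substring B looks up occurs in loc
lemma isIn_of_mem_pvSubs (loc sub : String) (hmem : sub ∈ pvSubs loc) :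
    PySem.Str.isIn sub loc = true := by
  unfold pvSubs at hmem
  simp only [List.mem_flatMap, List.mem_map, PySem.List.mem_pyRange_one, PySem.Str.len_eq] at hmem
  obtain ⟨i, ⟨hi0, hilt⟩, j, ⟨hj1, hj2⟩, rfl⟩ := hmem
  have h0j : (0:Int) ≤ j := by omega
  have hjn : j ≤ (loc.toList.length : Int) := by
    have := min_le_right (i+9) ((loc.toList.length : Int))
    omega
  rw [PySem.Str.isIn_iff_infix]
  have hsl : (PySem.Str.slice loc (some i) (some j)).toList
      = (loc.toList.drop i.toNat).take (j.toNat - i.toNat) := by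
    rw [PySem.Str.toList_slice, PySem.Chars.slice_eq_listSlice, PySem.List.slice_toNat loc.toList hi0 h0j]
  rw [hsl]
  exact ⟨loc.toList.take i.toNat, (loc.toList.drop i.toNat).drop (j.toNat - i.toNat),
    by rw [List.append_assoc, List.take_append_drop, List.take_append_drop]⟩

-- a keyword of priority p occurring in loc yields a looked-up hit, bounding the fold
lemma best_le_of_kw (loc kw : String) (p : Int)
    (hget : PySem.Dict.get? pvPriority kw = some p)
    (hlen : kw.toList.length ≤ 9) (hne : kw.toList ≠ [])
    (hin : PySem.Str.isIn kw loc = true) :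
    (pvSubs loc).foldl pvStep 7 ≤ p := by
  have hinC : PySem.Chars.isIn kw.toList loc.toList = true := by
    rw [PySem.Chars.isIn_iff_infix]
    exact (PySem.Str.isIn_iff_infix kw loc).mp hin
  obtain ⟨a, hpre⟩ := (PySem.Chars.exists_prefix_drop_iff_isIn kw.toList loc.toList).mpr hinC
  have hm1 : 1 ≤ kw.toList.length := by
    cases hk : kw.toList with
    | nil => exact absurd hk hne
    | cons c cs => simp
  have hml : kw.toList.length + a ≤ loc.toList.length := by
    have := hpre.length_le
    simp only [List.length_drop] at this
    omega
  have hslice : PySem.Str.slice loc (some (a:Int)) (some ((a:Int)+(kw.toList.length:Int))) = kw := by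
    apply String.toList_inj.mp
    rw [PySem.Str.toList_slice, PySem.Chars.slice_eq_listSlice, PySem.List.slice_natCast_add]
    obtain ⟨t, ht⟩ := hpre
    rw [← ht]
    simp
  have hmem : PySem.Str.slice loc (some (a:Int)) (some ((a:Int)+(kw.toList.length:Int))) ∈ pvSubs loc := by
    unfold pvSubs
    refine List.mem_flatMap.mpr ⟨(a:Int), ?_, List.mem_map.mpr ⟨(a:Int)+(kw.toList.length:Int), ?_, rfl⟩⟩
    · rw [PySem.List.mem_pyRange_one, PySem.Str.len_eq]
      constructor <;> omega
    · rw [PySem.List.mem_pyRange_one, PySem.Str.len_eq]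
      refine ⟨by omega, ?_⟩
      have hmin : (a:Int)+(kw.toList.length:Int) ≤ min ((a:Int)+9) ((loc.toList.length:Int)) :=
        le_min (by omega) (by omega)
      omega
  rw [hslice] at hmem
  exact foldl_pvStep_le_hit (pvSubs loc) kw p hget 7 hmem

lemma best_le_of_cond (loc : String) (q : Int) (h0 : 0 ≤ q) (h7 : q < 7)
    (hc : pvCond loc q = true) : (pvSubs loc).foldl pvStep 7 ≤ q := by
  obtain ⟨kw, hkw, hin⟩ := List.any_eq_true.mp hc
  interval_cases q
  · have hkw' : kw ∈ (["finance", "account", "payroll", "invoice"] : List String) := hkw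
    fin_cases hkw' <;> exact best_le_of_kw loc _ _ (by decide) (by decide) (by decide) hin
  · have hkw' : kw ∈ (["hr", "recruit", "talent"] : List String) := hkw
    fin_cases hkw' <;> exact best_le_of_kw loc _ _ (by decide) (by decide) (by decide) hin
  · have hkw' : kw ∈ (["ceo", "cfo", "coo", "cto", "exec", "director"] : List String) := hkw
    fin_cases hkw' <;> exact best_le_of_kw loc _ _ (by decide) (by decide) (by decide) hin
  · have hkw' : kw ∈ (["sales", "bizdev"] : List String) := hkw
    fin_cases hkw' <;> exact best_le_of_kw loc _ _ (by decide) (by decide) (by decide) hin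
  · have hkw' : kw ∈ (["marketing", "brand", "campaign"] : List String) := hkw
    fin_cases hkw' <;> exact best_le_of_kw loc _ _ (by decide) (by decide) (by decide) hin
  · have hkw' : kw ∈ (["eng", "dev", "sre", "qa", "tech"] : List String) := hkw
    fin_cases hkw' <;> exact best_le_of_kw loc _ _ (by decide) (by decide) (by decide) hin
  · have hkw' : kw ∈ (["it", "helpdesk", "support", "ops"] : List String) := hkw
    fin_cases hkw' <;> exact best_le_of_kw loc _ _ (by decide) (by decide) (by decide) hin

lemma best_cases (loc : String) :
    (pvSubs loc).foldl pvStep 7 = 7 ∨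
    (0 ≤ (pvSubs loc).foldl pvStep 7 ∧ (pvSubs loc).foldl pvStep 7 ≤ 6 ∧
      pvCond loc ((pvSubs loc).foldl pvStep 7) = true) := by
  rcases foldl_pvStep_reach (pvSubs loc) 7 with h | ⟨sub, hmem, hp⟩
  · exact Or.inl h
  · obtain ⟨h0, h6, hg⟩ := get?_sound sub _ hp
    refine Or.inr ⟨h0, h6, ?_⟩
    unfold pvCond
    rw [List.any_eq_true]
    exact ⟨sub, hg, isIn_of_mem_pvSubs loc sub hmem⟩

lemma first_le_of_cond (loc : String) (q : Int) (h0 : 0 ≤ q) (h6 : q ≤ 6)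
    (hc : pvCond loc q = true) : pvFirst loc ≤ q := by
  unfold pvFirst
  interval_cases q <;> split_ifs <;> first | omega | simp_all

lemma best_eq_first (loc : String) : (pvSubs loc).foldl pvStep 7 = pvFirst loc := by
  have hle : (pvSubs loc).foldl pvStep 7 ≤ pvFirst loc := by
    unfold pvFirst
    split_ifs with c0 c1 c2 c3 c4 c5 c6
    · exact best_le_of_cond loc 0 (by omega) (by omega) c0
    · exact best_le_of_cond loc 1 (by omega) (by omega) c1
    · exact best_le_of_cond loc 2 (by omega) (by omega) c2
    · exact best_le_of_cond loc 3 (by omega) (by omega) c3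
    · exact best_le_of_cond loc 4 (by omega) (by omega) c4
    · exact best_le_of_cond loc 5 (by omega) (by omega) c5
    · exact best_le_of_cond loc 6 (by omega) (by omega) c6
    · exact foldl_pvStep_le _ 7
  have hge : pvFirst loc ≤ (pvSubs loc).foldl pvStep 7 := by
    rcases best_cases loc with h | ⟨h0, h6, hc⟩
    · rw [h]; unfold pvFirst; split_ifs <;> omega
    · exact first_le_of_cond loc _ h0 h6 hc
  omega

lemma infer_department_eq (s : String) :
    infer_department_py s = infer_department_py_alt s := by
  unfold infer_department_py infer_department_py_alt
  simp only []
  generalize PySem.Str.lower (((PySem.Str.splitMax? s "@" 1).getD []).headD "") = loc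
  rw [alt_fold_eq loc, best_eq_first loc]
  have e0 : (PySem.Str.isIn "finance" loc || (PySem.Str.isIn "account" loc || (PySem.Str.isIn "payroll" loc || (PySem.Str.isIn "invoice" loc)))) = pvCond loc 0 := by
    simp [pvCond, pvGroups]
  have e1 : (PySem.Str.isIn "hr" loc || (PySem.Str.isIn "recruit" loc || (PySem.Str.isIn "talent" loc))) = pvCond loc 1 := by
    simp [pvCond, pvGroups]
  have e2 : (PySem.Str.isIn "ceo" loc || (PySem.Str.isIn "cfo" loc || (PySem.Str.isIn "coo" loc || (PySem.Str.isIn "cto" loc || (PySem.Str.isIn "exec" loc || (PySem.Str.isIn "director" loc)))))) = pvCond loc 2 := by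
    simp [pvCond, pvGroups]
  have e3 : (PySem.Str.isIn "sales" loc || (PySem.Str.isIn "bizdev" loc)) = pvCond loc 3 := by
    simp [pvCond, pvGroups]
  have e4 : (PySem.Str.isIn "marketing" loc || (PySem.Str.isIn "brand" loc || (PySem.Str.isIn "campaign" loc))) = pvCond loc 4 := by
    simp [pvCond, pvGroups]
  have e5 : (PySem.Str.isIn "eng" loc || (PySem.Str.isIn "dev" loc || (PySem.Str.isIn "sre" loc || (PySem.Str.isIn "qa" loc || (PySem.Str.isIn "tech" loc))))) = pvCond loc 5 := by
    simp [pvCond, pvGroups]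
  have e6 : (PySem.Str.isIn "it" loc || (PySem.Str.isIn "helpdesk" loc || (PySem.Str.isIn "support" loc || (PySem.Str.isIn "ops" loc)))) = pvCond loc 6 := by
    simp [pvCond, pvGroups]
  rw [e0, e1, e2, e3, e4, e5, e6]
  unfold pvFirst
  split_ifs <;> rfl

-- ===== VERDICT (by name: the statement is the Claim_ definition above) =====
theorem infer_department_py_spec : Claim_equal_infer_department_py := by
  intro s _
  exact infer_department_eq s
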